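-- pv_equiv track=rewrite | github.com/tarunganesh2004/GFG | 2025/August/13th_august.py | minSoldiers
-- ===== SOURCE A (Python) =====
-- def minSoldiers(arr,k):
--     import math
--     n=len(arr)
--
--     # find number of lucky troops
--     lucky_count=0
--     for x in arr:
--         if x % k == 0:
--             lucky_count += 1
--
--     # target(required number of lucky troops)
--     target=math.ceil(n/2)
--
--     if lucky_count >= target:
--         return 0
--
--     # cost for each unlucky troop
--     costs=[]
--     for x in arr:
--         if x%k!=0:
--             costs.append(k-(x%k))
--
--     costs.sort()
--
--     needed= target - lucky_count
--     total=sum(costs[:needed])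
--     return total
-- ===== SOURCE B (Python) =====
-- def _sum_smallest(lst, m):
--     # sum of the m smallest elements of lst (all of them if m >= len(lst)),
--     # by three-way quickselect partitioning: average O(len(lst)).
--     if m <= 0:
--         return 0
--     if m >= len(lst):
--         return sum(lst)
--     pivot = lst[len(lst) // 2]
--     lo = [x for x in lst if x < pivot]
--     hi = [x for x in lst if x > pivot]
--     eq = len(lst) - len(lo) - len(hi)
--     if m <= len(lo):
--         return _sum_smallest(lo, m)
--     if m <= len(lo) + eq:
--         return sum(lo) + pivot * (m - len(lo))
--     return sum(lo) + pivot * eq + _sum_smallest(hi, m - len(lo) - eq)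
--
--
-- def minSoldiers(arr, k):
--     n = len(arr)
--     costs = [k - x % k for x in arr if x % k != 0]
--     needed = (n + 1) // 2 - (n - len(costs))
--     if needed <= 0:
--         return 0
--     return _sum_smallest(costs, needed)
-- ===== Notes on version B (the rewrite author's own statement) =====
-- stated objective: alternative
-- what changed: Instead of sorting the whole cost list and summing a prefix, B sums the `needed` smallest costs by a three-way quickselect partition around the middle element (recursing only into the side containing the selection boundary), and folds the lucky-troop count into one comprehension pass.
-- outside the precondition, e.g. on minSoldiers([1, 2], 0): A raises ZeroDivisionError, B raises ZeroDivisionError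
import Mathlib
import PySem

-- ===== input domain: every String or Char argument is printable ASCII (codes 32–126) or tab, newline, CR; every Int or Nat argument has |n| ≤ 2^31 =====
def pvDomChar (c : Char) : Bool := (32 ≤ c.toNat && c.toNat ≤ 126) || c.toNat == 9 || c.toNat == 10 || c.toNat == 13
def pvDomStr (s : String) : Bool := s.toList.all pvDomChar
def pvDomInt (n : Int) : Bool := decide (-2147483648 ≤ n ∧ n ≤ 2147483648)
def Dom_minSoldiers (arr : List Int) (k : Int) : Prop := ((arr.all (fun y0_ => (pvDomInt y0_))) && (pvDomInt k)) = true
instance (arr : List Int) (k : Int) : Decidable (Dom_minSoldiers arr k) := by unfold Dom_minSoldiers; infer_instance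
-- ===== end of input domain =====

-- B replaces A's full sort of the cost list by a three-way quickselect partition
-- that sums the `needed` smallest costs directly (objective: alternative algorithm).

-- ===== PORT A =====
def minSoldiers (arr : List Int) (k : Int) : Int :=
  let n : Int := (arr.length : Int)
  let lucky_count : Int := arr.foldl (fun c x => if PySem.Int.mod x k = 0 then c + 1 else c) 0
  -- math.ceil(n/2): n = len(arr) is a nonnegative int < 2^52, so the float n/2 is exact
  -- and math.ceil(n/2) = (n+1)//2; ported as that integer computation.
  let target : Int := PySem.Int.floordiv (n + 1) 2
  if lucky_count ≥ target then 0
  else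
    let costs : List Int :=
      arr.foldl (fun acc x => if PySem.Int.mod x k ≠ 0 then acc ++ [k - PySem.Int.mod x k] else acc) []
    let sortedCosts := PySem.List.sorted costs (fun x => x) false
    let needed := target - lucky_count
    (PySem.List.slice sortedCosts none (some needed)).sum

-- ===== PORT B =====
-- helper lemma cited by the port's decreasing_by
theorem pv_filter_lt_length (l : List Int) (x : Int) (hx : x ∈ l) (p : Int → Bool)
    (hp : p x = false) : (l.filter p).length < l.length := by
  induction l with
  | nil => cases hx
  | cons a t ih =>
    rcases List.mem_cons.mp hx with h | h
    · have hpa : p a = false := h ▸ hp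
      have he : (a :: t).filter p = t.filter p := by simp [hpa]
      rw [he, List.length_cons]
      exact Nat.lt_succ_of_le (List.length_filter_le _ _)
    · rw [List.filter_cons, List.length_cons]
      split
      · rw [List.length_cons]
        exact Nat.succ_lt_succ (ih h)
      · exact Nat.lt_succ_of_lt (ih h)

theorem pv_attach_filter_lt (lst : List Int) (x : Int) (hx : x ∈ lst) (p : Int → Bool)
    (hp : p x = false) :
    (List.filter (fun y => p y.1) lst.attach).unattach.length < lst.length := by
  have h1 : (List.filter (fun y => p y.1) lst.attach).unattach.length
      = (lst.filter p).length := by simp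
  rw [h1]
  exact pv_filter_lt_length lst x hx p hp

theorem pv_mid_mem (lst : List Int) (hl : lst ≠ []) :
    lst.getD (lst.length / 2) 0 ∈ lst := by
  have hlt : lst.length / 2 < lst.length :=
    Nat.div_lt_self (List.length_pos_iff.mpr hl) (by omega)
  rw [List.getD_eq_getElem lst 0 hlt]
  exact List.getElem_mem hlt

def sumSmallest (lst : List Int) (m : Int) : Int :=
  if m ≤ 0 then 0
  else if (lst.length : Int) ≤ m then lst.sum
  else
    -- here 0 < m < len lst, so lst ≠ [] and len//2 < len: Python's
    -- lst[len(lst) // 2] is exactly getD (length / 2) (index in range, Nat division)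
    let pivot := lst.getD (lst.length / 2) 0
    let lo := lst.filter (fun x => x < pivot)
    let hi := lst.filter (fun x => pivot < x)
    let eqn : Int := (lst.length : Int) - lo.length - hi.length
    if m ≤ (lo.length : Int) then sumSmallest lo m
    else if m ≤ (lo.length : Int) + eqn then lo.sum + pivot * (m - lo.length)
    else lo.sum + pivot * eqn + sumSmallest hi (m - (lo.length : Int) - eqn)
termination_by lst.length
decreasing_by
  · have hl : lst ≠ [] := by
      rintro rfl
      simp only [List.length_nil, Nat.cast_zero] at *
      omega
    exact pv_attach_filter_lt lst _ (pv_mid_mem lst hl)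
      (fun y => decide (y < lst.getD (lst.length / 2) 0)) (by simp)
  · have hl : lst ≠ [] := by
      rintro rfl
      simp only [List.length_nil, Nat.cast_zero] at *
      omega
    exact pv_attach_filter_lt lst _ (pv_mid_mem lst hl)
      (fun y => decide (lst.getD (lst.length / 2) 0 < y)) (by simp)

def minSoldiers_alt (arr : List Int) (k : Int) : Int :=
  let n : Int := (arr.length : Int)
  let costs : List Int :=
    (arr.filter (fun x => PySem.Int.mod x k ≠ 0)).map (fun x => k - PySem.Int.mod x k)
  let needed : Int := PySem.Int.floordiv (n + 1) 2 - (n - costs.length)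
  if needed ≤ 0 then 0 else sumSmallest costs needed

-- ===== PRECONDITION & SPEC =====
-- Pre_ excludes exactly k = 0, on which Python's `x % k` raises ZeroDivisionError.
def Pre_minSoldiers (arr : List Int) (k : Int) : Prop := k ≠ 0
instance (arr : List Int) (k : Int) : Decidable (Pre_minSoldiers arr k) := by unfold Pre_minSoldiers; infer_instance
def pvWitness_minSoldiers : List Int × Int := ([1, 2, 3, 4, 5], 3)

def Spec_minSoldiers (arr : List Int) (k : Int) (out : Int) : Prop := out = minSoldiers_alt arr k
instance (arr : List Int) (k : Int) (out : Int) : Decidable (Spec_minSoldiers arr k out) := by unfold Spec_minSoldiers; infer_instance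

-- ===== CLAIM (what is proved, stated in full; the proofs are below) =====
def Claim_equal_minSoldiers : Prop := ∀ (arr : List Int) (k : Int), Dom_minSoldiers arr k → Pre_minSoldiers arr k → Spec_minSoldiers arr k (minSoldiers arr k)

-- ===== LEMMAS AND PROOFS =====

-- three-way partition of a list by comparison with a pivot, as a permutation
theorem pv_perm3 (l : List Int) (p : Int) :
    (l.filter (fun x => x < p) ++ (l.filter (fun x => x = p) ++ l.filter (fun x => p < x))).Perm l := by
  induction l with
  | nil => simp
  | cons a t ih =>
    simp only [List.filter_cons]
    rcases lt_trichotomy a p with h | h | h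
    · rw [if_pos (by simpa using h), if_neg (by simpa using ne_of_lt h),
        if_neg (by simpa using asymm h)]
      simpa using ih.cons a
    · subst h
      rw [if_neg (by simpa using lt_irrefl a), if_pos (by simp),
        if_neg (by simpa using lt_irrefl a)]
      have he : (a :: t.filter (fun x => x = a)) ++ t.filter (fun x => a < x)
          = a :: (t.filter (fun x => x = a) ++ t.filter (fun x => a < x)) := rfl
      rw [he]
      exact (List.perm_middle).trans (ih.cons a)
    · rw [if_neg (by simpa using asymm h), if_neg (by simpa using ne_of_gt h),
        if_pos (by simpa using h)]
      exact ((List.Perm.append_left _ List.perm_middle).trans List.perm_middle).trans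
        (ih.cons a)

-- sorted l splits as sorted(below pivot) ++ copies of the pivot ++ sorted(above pivot)
theorem pv_sorted_decomp (l : List Int) (p : Int) :
    PySem.List.sorted l (fun x => x) false =
      PySem.List.sorted (l.filter (fun x => x < p)) (fun x => x) false ++
      (List.replicate (l.filter (fun x => x = p)).length p ++
       PySem.List.sorted (l.filter (fun x => p < x)) (fun x => x) false) := by
  have hrep : l.filter (fun x => x = p) = List.replicate (l.filter (fun x => x = p)).length p := by
    apply List.eq_replicate_of_mem
    intro b hb
    have := List.of_mem_filter hb
    simpa using this
  apply PySem.List.sorted_id_eq_of_perm_of_pairwise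
  · refine List.Perm.trans ?_ (pv_perm3 l p)
    exact List.Perm.append (PySem.List.sorted_perm _ _ _)
      (List.Perm.append (hrep ▸ List.Perm.refl _) (PySem.List.sorted_perm _ _ _))
  · rw [List.pairwise_append]
    refine ⟨PySem.List.sorted_pairwise _ _, ?_, ?_⟩
    · rw [List.pairwise_append]
      refine ⟨by simp [List.pairwise_replicate], PySem.List.sorted_pairwise _ _, ?_⟩
      intro a ha b hb
      have ha' : a = p := List.eq_of_mem_replicate ha
      have hb' : p < b := by
        have := (PySem.List.mem_sorted _ _ _ _).mp hb
        simpa using List.of_mem_filter this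
      omega
    · intro a ha b hb
      have ha' : a < p := by
        have := (PySem.List.mem_sorted _ _ _ _).mp ha
        simpa using List.of_mem_filter this
      rcases List.mem_append.mp hb with hb | hb
      · have : b = p := List.eq_of_mem_replicate hb
        omega
      · have : p < b := by
          have := (PySem.List.mem_sorted _ _ _ _).mp hb
          simpa using List.of_mem_filter this
        omega

-- the quickselect recursion computes the sum of the m smallest elements
theorem pv_sumSmallest_eq (N : Nat) : ∀ (l : List Int) (m : Int), l.length = N →
    sumSmallest l m = ((PySem.List.sorted l (fun x => x) false).take m.toNat).sum := by
  induction N using Nat.strong_induction_on with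
  | _ N ih =>
    intro l m hN
    rw [sumSmallest]
    by_cases h1 : m ≤ 0
    · rw [if_pos h1, Int.toNat_of_nonpos h1]
      simp
    rw [if_neg h1]
    by_cases h2 : (l.length : Int) ≤ m
    · rw [if_pos h2, List.take_of_length_le (by rw [PySem.List.length_sorted]; omega)]
      exact ((PySem.List.sorted_perm l _ _).sum_eq).symm
    rw [if_neg h2]
    have hl : l ≠ [] := by
      intro h; subst h; simp at h2; omega
    set p := l.getD (l.length / 2) 0 with hp
    have hpm : p ∈ l := hp ▸ pv_mid_mem l hl
    set f1 := l.filter (fun x => x < p) with hf1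
    set f2 := l.filter (fun x => x = p) with hf2
    set f3 := l.filter (fun x => p < x) with hf3
    have hlen : f1.length + (f2.length + f3.length) = l.length := by
      have := (pv_perm3 l p).length_eq
      simpa using this
    have ha : f1.length < l.length := pv_filter_lt_length l p hpm _ (by simp)
    have hb : f3.length < l.length := pv_filter_lt_length l p hpm _ (by simp)
    have hdec := pv_sorted_decomp l p
    rw [← hf1, ← hf2, ← hf3] at hdec
    have hs1len : (PySem.List.sorted f1 (fun x => x) false).length = f1.length :=
      PySem.List.length_sorted _ _ _
    have hs3len : (PySem.List.sorted f3 (fun x => x) false).length = f3.length :=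
      PySem.List.length_sorted _ _ _
    have heqn : (l.length : Int) - f1.length - f3.length = (f2.length : Int) := by
      omega
    by_cases h3 : m ≤ (f1.length : Int)
    · rw [if_pos h3, hdec, List.take_append_of_le_length (by omega)]
      exact ih f1.length (by omega) f1 m rfl
    rw [if_neg h3, heqn]
    by_cases h4 : m ≤ (f1.length : Int) + f2.length
    · rw [if_pos h4, hdec]
      rw [List.take_append,
        List.take_of_length_le (by omega),
        List.take_append,
        List.take_replicate, List.length_replicate]
      have hmin : min (m.toNat - (PySem.List.sorted f1 (fun x => x) false).length) f2.length
          = m.toNat - f1.length := by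
        rw [hs1len]; omega
      have htake3 : (m.toNat - (PySem.List.sorted f1 (fun x => x) false).length - f2.length) = 0 := by
        rw [hs1len]; omega
      rw [hmin, htake3, List.take_zero, List.sum_append, List.sum_append,
        List.sum_nil, List.sum_replicate, (PySem.List.sorted_perm f1 _ _).sum_eq]
      have hc : ((m.toNat - f1.length : Nat) : Int) = m - f1.length := by omega
      rw [nsmul_eq_mul, hc]
      ring
    · rw [if_neg h4, hdec]
      rw [List.take_append,
        List.take_of_length_le (by omega),
        List.take_append,
        List.take_of_length_le (by rw [List.length_replicate]; omega),
        List.length_replicate, hs1len,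
        List.sum_append, List.sum_append, List.sum_replicate,
        (PySem.List.sorted_perm f1 _ _).sum_eq]
      have hrec := ih f3.length (by omega) f3 (m - f1.length - f2.length) rfl
      have hT : (m - (f1.length : Int) - f2.length).toNat = m.toNat - f1.length - f2.length := by
        omega
      rw [hrec, hT, nsmul_eq_mul]
      ring

-- the two ports agree everywhere (k = 0 included is excluded by Pre_, but not needed here)
theorem pv_ports_eq (arr : List Int) (k : Int) : minSoldiers arr k = minSoldiers_alt arr k := by
  unfold minSoldiers minSoldiers_alt
  dsimp only
  rw [PySem.List.foldl_ite_add_one, PySem.List.foldl_append_ite]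
  simp only [List.nil_append, List.length_map, zero_add]
  have hsplit : List.countP (fun x => decide (PySem.Int.mod x k = 0)) arr
      + (arr.filter (fun x => decide (PySem.Int.mod x k ≠ 0))).length = arr.length := by
    have h2 := List.length_eq_length_filter_add
      (l := arr) (fun x => decide (PySem.Int.mod x k = 0))
    have h3 : (fun x => !(decide (PySem.Int.mod x k = 0)))
        = (fun x => decide (PySem.Int.mod x k ≠ 0)) := by
      funext x; simp
    rw [h3] at h2
    rw [List.countP_eq_length_filter]
    omega
  split_ifs with hA hB hB
  · rfl
  · exfalso; omega
  · exfalso; omega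
  · have hneed : PySem.Int.floordiv ((arr.length : Int) + 1) 2
        - ((arr.length : Int)
          - ((arr.filter (fun x => decide (PySem.Int.mod x k ≠ 0))).length : Int))
      = PySem.Int.floordiv ((arr.length : Int) + 1) 2
        - (List.countP (fun x => decide (PySem.Int.mod x k = 0)) arr : Int) := by
      omega
    rw [hneed]
    have hb0 : (0 : Int) ≤ PySem.Int.floordiv ((arr.length : Int) + 1) 2
        - (List.countP (fun x => decide (PySem.Int.mod x k = 0)) arr : Int) := by omega
    rw [PySem.List.slice_to _ hb0]
    exact (pv_sumSmallest_eq _ _ _ rfl).symm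

-- ===== VERDICT (by name: the statement is the Claim_ definition above) =====
theorem minSoldiers_spec : Claim_equal_minSoldiers := by
  intro arr k _ _
  unfold Spec_minSoldiers
  exact pv_ports_eq arr k
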